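-- pv_equiv track=rewrite | github.com/LuizaSantoscreator/Materia_PBE | funções.py | classificar_numeros
-- ===== SOURCE A (Python) =====
-- def classificar_numeros(numeros):
--     resultado = []
--     for num in numeros:
--         if num < 5:
--             resultado.append((num, "Pequeno"))
--         elif num < 10:
--             resultado.append((num, "Médio"))
--         else:
--             resultado.append((num, "Grande"))
--     return resultado
-- ===== SOURCE B (Python) =====
-- def classificar_numeros(numeros):
--     pares = list(enumerate(numeros))
--     pequenos = [(i, (n, "Pequeno")) for i, n in pares if n < 5]
--     medios = [(i, (n, "Médio")) for i, n in pares if 5 <= n < 10]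
--     grandes = [(i, (n, "Grande")) for i, n in pares if n >= 10]
--     return [par for _, par in sorted(pequenos + medios + grandes, key=lambda t: t[0])]
-- ===== Notes on version B (the rewrite author's own statement) =====
-- stated objective: alternative
-- what changed: Instead of a single pass with an if/elif chain appending to an accumulator, B makes three staged partition passes over the enumerated input (one filtered pass per category), concatenates the three labelled groups and merges them back into input order by sorting on the original index.
import Mathlib
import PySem

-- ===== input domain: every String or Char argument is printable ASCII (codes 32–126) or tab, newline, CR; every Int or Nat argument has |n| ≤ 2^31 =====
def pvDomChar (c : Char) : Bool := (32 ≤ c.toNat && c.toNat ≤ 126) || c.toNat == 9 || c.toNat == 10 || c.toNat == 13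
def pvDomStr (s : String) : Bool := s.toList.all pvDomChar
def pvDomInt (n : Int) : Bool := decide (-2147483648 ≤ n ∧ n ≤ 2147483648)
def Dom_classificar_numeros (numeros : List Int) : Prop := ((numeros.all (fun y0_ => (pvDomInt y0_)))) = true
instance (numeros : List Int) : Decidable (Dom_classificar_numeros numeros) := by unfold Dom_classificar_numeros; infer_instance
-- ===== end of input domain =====

-- B replaces A's single-pass if/elif accumulator loop by three staged partition passes over the
-- enumerated input, merged back into input order by sorting on the original index (alternative
-- decomposition; return value only, no mutation involved).

-- ===== PORT A =====
-- literal port: accumulator list, per-element if/elif/else append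
def classificar_numeros (numeros : List Int) : List (Int × String) :=
  numeros.foldl (fun resultado num =>
    if num < 5 then resultado ++ [(num, "Pequeno")]
    else if num < 10 then resultado ++ [(num, "Médio")]
    else resultado ++ [(num, "Grande")]) []

-- ===== PORT B =====
-- three filtered passes over list(enumerate(numeros)), concatenated and re-merged by index
def classificar_numeros_alt (numeros : List Int) : List (Int × String) :=
  let pares := PySem.List.enumerate numeros
  let pequenos := (pares.filter (fun p => decide (p.2 < 5))).map (fun p => (p.1, (p.2, "Pequeno")))
  let medios := (pares.filter (fun p => decide (5 ≤ p.2 ∧ p.2 < 10))).map (fun p => (p.1, (p.2, "Médio")))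
  let grandes := (pares.filter (fun p => decide (10 ≤ p.2))).map (fun p => (p.1, (p.2, "Grande")))
  (PySem.List.sorted (pequenos ++ medios ++ grandes) (fun t => t.1) false).map (fun t => t.2)

-- ===== PRECONDITION & SPEC =====
def Spec_classificar_numeros (numeros : List Int) (out : List (Int × String)) : Prop := out = classificar_numeros_alt numeros
instance (numeros : List Int) (out : List (Int × String)) : Decidable (Spec_classificar_numeros numeros out) := by unfold Spec_classificar_numeros; infer_instance

-- ===== CLAIM (what is proved, stated in full; the proofs are below) =====
def Claim_equal_classificar_numeros : Prop := ∀ (numeros : List Int), Dom_classificar_numeros numeros → Spec_classificar_numeros numeros (classificar_numeros numeros)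

-- ===== LEMMAS AND PROOFS =====
-- the common per-element classification both programs compute
def pvRotulo (n : Int) : Int × String :=
  if n < 5 then (n, "Pequeno") else if n < 10 then (n, "Médio") else (n, "Grande")

-- A's foldl with any accumulator is the accumulator followed by the per-element map
lemma classificar_foldl_acc (numeros : List Int) (acc : List (Int × String)) :
    numeros.foldl (fun resultado num =>
      if num < 5 then resultado ++ [(num, "Pequeno")]
      else if num < 10 then resultado ++ [(num, "Médio")]
      else resultado ++ [(num, "Grande")]) acc
    = acc ++ numeros.map pvRotulo := by
  induction numeros generalizing acc with
  | nil => simp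
  | cons num rest ih =>
    simp only [List.foldl_cons, List.map_cons, ih, pvRotulo]
    split_ifs <;> simp

-- A ++ (x :: M) ++ G is a permutation of x :: (A ++ M ++ G)
lemma perm_mid {a : Type} (x : a) (A M G : List a) :
    (A ++ (x :: M) ++ G).Perm (x :: (A ++ M ++ G)) := by
  have h1 : A ++ (x :: M) ++ G = A ++ x :: (M ++ G) := by simp
  have h2 : x :: (A ++ M ++ G) = x :: (A ++ (M ++ G)) := by simp
  rw [h1, h2]; exact List.perm_middle

-- A ++ M ++ (x :: G) is a permutation of x :: (A ++ M ++ G)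
lemma perm_last {a : Type} (x : a) (A M G : List a) :
    (A ++ M ++ (x :: G)).Perm (x :: (A ++ M ++ G)) :=
  List.perm_middle

-- B's three concatenated partition passes are a permutation of the labelled enumeration
lemma partition_perm (l : List (Int × Int)) :
    ((l.filter (fun p => decide (p.2 < 5))).map (fun p => (p.1, (p.2, "Pequeno")))
      ++ (l.filter (fun p => decide (5 ≤ p.2 ∧ p.2 < 10))).map (fun p => (p.1, (p.2, "Médio")))
      ++ (l.filter (fun p => decide (10 ≤ p.2))).map (fun p => (p.1, (p.2, "Grande")))).Perm
    (l.map (fun p => (p.1, pvRotulo p.2))) := by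
  induction l with
  | nil => simp
  | cons q rest ih =>
    by_cases h1 : q.2 < 5
    · have hr : pvRotulo q.2 = (q.2, "Pequeno") := by simp [pvRotulo, h1]
      have hf1 : ¬ ((5:Int) ≤ q.2 ∧ q.2 < 10) := by omega
      have hf2 : ¬ ((10:Int) ≤ q.2) := by omega
      simpa [h1, hf1, hf2, hr] using ih.cons ((q.1, (q.2, "Pequeno")))
    · by_cases h2 : q.2 < 10
      · have hr : pvRotulo q.2 = (q.2, "Médio") := by simp [pvRotulo, h1, h2]
        have ht : ((5:Int) ≤ q.2 ∧ q.2 < 10) := by omega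
        have hf2 : ¬ ((10:Int) ≤ q.2) := by omega
        have heq : ((q :: rest).filter (fun p => decide (p.2 < 5))).map (fun p => (p.1, (p.2, "Pequeno")))
            ++ ((q :: rest).filter (fun p => decide (5 ≤ p.2 ∧ p.2 < 10))).map (fun p => (p.1, (p.2, "Médio")))
            ++ ((q :: rest).filter (fun p => decide (10 ≤ p.2))).map (fun p => (p.1, (p.2, "Grande")))
            = (rest.filter (fun p => decide (p.2 < 5))).map (fun p => (p.1, (p.2, "Pequeno")))
            ++ ((q.1, (q.2, "Médio")) :: (rest.filter (fun p => decide (5 ≤ p.2 ∧ p.2 < 10))).map (fun p => (p.1, (p.2, "Médio"))))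
            ++ (rest.filter (fun p => decide (10 ≤ p.2))).map (fun p => (p.1, (p.2, "Grande"))) := by
          simp [h1, ht, hf2]
        rw [heq]
        refine (perm_mid _ _ _ _).trans ?_
        simpa [hr] using ih.cons ((q.1, (q.2, "Médio")))
      · have hr : pvRotulo q.2 = (q.2, "Grande") := by simp [pvRotulo, h1, h2]
        have ht : ((10:Int) ≤ q.2) := by omega
        have heq : ((q :: rest).filter (fun p => decide (p.2 < 5))).map (fun p => (p.1, (p.2, "Pequeno")))
            ++ ((q :: rest).filter (fun p => decide (5 ≤ p.2 ∧ p.2 < 10))).map (fun p => (p.1, (p.2, "Médio")))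
            ++ ((q :: rest).filter (fun p => decide (10 ≤ p.2))).map (fun p => (p.1, (p.2, "Grande")))
            = (rest.filter (fun p => decide (p.2 < 5))).map (fun p => (p.1, (p.2, "Pequeno")))
            ++ (rest.filter (fun p => decide (5 ≤ p.2 ∧ p.2 < 10))).map (fun p => (p.1, (p.2, "Médio")))
            ++ ((q.1, (q.2, "Grande")) :: (rest.filter (fun p => decide (10 ≤ p.2))).map (fun p => (p.1, (p.2, "Grande")))) := by
          simp [h1, h2, ht]
        rw [heq]
        refine (perm_last _ _ _ _).trans ?_
        simpa [hr] using ih.cons ((q.1, (q.2, "Grande")))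

-- the labelled enumeration is strictly increasing in its first component
lemma pairwise_lt_labelled (numeros : List Int) :
    ((PySem.List.enumerate numeros).map (fun p => (p.1, pvRotulo p.2))).Pairwise
      (fun a b => (fun t : Int × (Int × String) => t.1) a < (fun t : Int × (Int × String) => t.1) b) := by
  refine List.Pairwise.map _ ?_ (PySem.List.pairwise_lt_enumerate (xs := numeros) (s := 0))
  intro a b h
  simpa using h

-- B computes the per-element map
lemma alt_eq_map (numeros : List Int) :
    classificar_numeros_alt numeros = numeros.map pvRotulo := by
  unfold classificar_numeros_alt
  have hs := PySem.List.sorted_eq_of_perm_of_pairwise_lt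
    (xs := (((PySem.List.enumerate numeros).filter (fun p => decide (p.2 < 5))).map (fun p => (p.1, (p.2, "Pequeno")))
      ++ ((PySem.List.enumerate numeros).filter (fun p => decide (5 ≤ p.2 ∧ p.2 < 10))).map (fun p => (p.1, (p.2, "Médio")))
      ++ ((PySem.List.enumerate numeros).filter (fun p => decide (10 ≤ p.2))).map (fun p => (p.1, (p.2, "Grande")))))
    (ys := (PySem.List.enumerate numeros).map (fun p => (p.1, pvRotulo p.2)))
    (key := fun t => t.1)
    ((partition_perm (PySem.List.enumerate numeros)).symm)
    (pairwise_lt_labelled numeros)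
  simp only []
  rw [hs, List.map_map]
  have h2 : ((fun t : Int × (Int × String) => t.2) ∘ (fun p : Int × Int => (p.1, pvRotulo p.2)))
      = pvRotulo ∘ (fun p : Int × Int => p.2) := rfl
  rw [h2, ← List.map_map, PySem.List.map_snd_enumerate]

-- ===== VERDICT (by name: the statement is the Claim_ definition above) =====
theorem classificar_numeros_spec : Claim_equal_classificar_numeros := by
  intro numeros _
  unfold Spec_classificar_numeros classificar_numeros
  rw [alt_eq_map]
  simpa using classificar_foldl_acc numeros []
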